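-- pv_equiv track=rewrite | github.com/pdanbi00/algorithm | 프로그래머스/Lv.1/86491. 최소직사각형/최소직사각형.py | solution
-- ===== SOURCE A (Python) =====
-- def solution(sizes):
--     w = []
--     h = []
--     for size in sizes:
--         if size[0] >= size[1]:
--             w.append(size[0])
--             h.append(size[1])
--         else:
--             h.append(size[0])
--             w.append(size[1])
--     return max(h) * max(w)
-- ===== SOURCE B (Python) =====
-- def solution(sizes):
--     # Divide-and-conquer: reduce the half-open index interval [lo, hi) of cards
--     # to the pair (max of larger sides, max of smaller sides), then multiply.
--     def dims(lo, hi):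
--         if hi - lo == 1:
--             a, b = sizes[lo][0], sizes[lo][1]
--             return (a, b) if a >= b else (b, a)
--         mid = (lo + hi) // 2
--         lw, lh = dims(lo, mid)
--         rw, rh = dims(mid, hi)
--         return max(lw, rw), max(lh, rh)
--     w, h = dims(0, len(sizes))
--     return h * w
-- ===== Notes on version B (the rewrite author's own statement) =====
-- stated objective: alternative
-- what changed: Replaces the branch-and-append loop building two lists then calling max twice with a divide-and-conquer recursion on index intervals that combines (max-larger-side, max-smaller-side) pairs from halves; no intermediate lists are built.
import Mathlib
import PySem

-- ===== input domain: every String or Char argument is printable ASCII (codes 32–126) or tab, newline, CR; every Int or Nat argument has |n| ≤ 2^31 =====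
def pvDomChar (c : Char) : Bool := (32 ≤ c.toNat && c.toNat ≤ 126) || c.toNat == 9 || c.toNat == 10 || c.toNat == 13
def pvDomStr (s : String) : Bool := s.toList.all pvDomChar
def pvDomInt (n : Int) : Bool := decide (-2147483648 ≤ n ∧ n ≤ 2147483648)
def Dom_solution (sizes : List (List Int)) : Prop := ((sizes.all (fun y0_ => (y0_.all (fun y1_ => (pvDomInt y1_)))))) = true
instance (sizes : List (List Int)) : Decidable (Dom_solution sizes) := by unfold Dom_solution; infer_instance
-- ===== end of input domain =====

-- B computes the answer by a divide-and-conquer recursion on index intervals that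
-- combines (max larger side, max smaller side) pairs from halves, instead of A's
-- branch-and-append loop building two lists then taking max of each (objective: alternative).


-- ===== PORT A =====
-- loop: for size in sizes, branch on size[0] >= size[1], appending to w and h; then max(h)*max(w).
def solution (sizes : List (List Int)) : Int :=
  let wh := sizes.foldl (fun (acc : List Int × List Int) size =>
      let s0 := PySem.List.pyGetD size 0 0
      let s1 := PySem.List.pyGetD size 1 0
      if s0 ≥ s1 then (acc.1 ++ [s0], acc.2 ++ [s1])
      else (acc.1 ++ [s1], acc.2 ++ [s0])) ([], [])
  ((PySem.List.max? wh.2 (fun x => x)).getD 0) * ((PySem.List.max? wh.1 (fun x => x)).getD 0)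

-- ===== PORT B =====
-- dims(lo, hi): divide-and-conquer over the half-open interval [lo, hi).
-- lo is a nonnegative in-range index under Pre_, so plain getD is exact for sizes[lo];
-- the 'hi ≤ lo' part of the base guard is a totality guard (Python diverges there, outside Pre_).
def solDims (sizes : List (List Int)) (lo hi : Nat) : Int × Int :=
  if _h : hi ≤ lo + 1 then
    let card := sizes.getD lo []
    let a := PySem.List.pyGetD card 0 0
    let b := PySem.List.pyGetD card 1 0
    if a ≥ b then (a, b) else (b, a)
  else
    let mid := (lo + hi) / 2
    let l := solDims sizes lo mid
    let r := solDims sizes mid hi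
    (max l.1 r.1, max l.2 r.2)
termination_by hi - lo
decreasing_by all_goals omega

def solution_alt (sizes : List (List Int)) : Int :=
  let d := solDims sizes 0 sizes.length
  d.2 * d.1

-- ===== PRECONDITION & SPEC =====
-- Pre_ excludes inputs where Python A raises: empty sizes (max() on empty → ValueError)
-- and cards with fewer than two entries (IndexError).
def Pre_solution (sizes : List (List Int)) : Prop :=
  sizes ≠ [] ∧ ∀ s ∈ sizes, 2 ≤ s.length
instance (sizes : List (List Int)) : Decidable (Pre_solution sizes) := by
  unfold Pre_solution; infer_instance

def pvWitness_solution : List (List Int) := [[60, 50], [30, 70], [60, 30], [80, 40]]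

def Spec_solution (sizes : List (List Int)) (out : Int) : Prop := out = solution_alt sizes
instance (sizes : List (List Int)) (out : Int) : Decidable (Spec_solution sizes out) := by unfold Spec_solution; infer_instance

-- ===== CLAIM (what is proved, stated in full; the proofs are below) =====
def Claim_equal_solution : Prop := ∀ (sizes : List (List Int)), Dom_solution sizes → Pre_solution sizes → Spec_solution sizes (solution sizes)

-- ===== LEMMAS AND PROOFS =====

-- per-card larger and smaller dimension
def fmax (s : List Int) : Int := max (PySem.List.pyGetD s 0 0) (PySem.List.pyGetD s 1 0)
def fmin (s : List Int) : Int := min (PySem.List.pyGetD s 0 0) (PySem.List.pyGetD s 1 0)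

-- max of a nonempty list as Python's max loop; 0 on [] (never used there)
def listMax : List Int → Int
  | [] => 0
  | x :: t => t.foldl max x

theorem foldl_max_shift (l : List Int) (a b : Int) :
    l.foldl max (max a b) = max a (l.foldl max b) := by
  induction l generalizing b with
  | nil => simp
  | cons c t ih => simpa [max_assoc] using ih (max b c)

theorem listMax_append (l1 l2 : List Int) (h1 : l1 ≠ []) (h2 : l2 ≠ []) :
    listMax (l1 ++ l2) = max (listMax l1) (listMax l2) := by
  match l1, l2 with
  | x :: t, y :: u =>
    simp [listMax, List.foldl_append, foldl_max_shift]

-- A's loop state after the whole traversal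
theorem solution_loop_eq (sizes : List (List Int)) (w h : List Int) :
    sizes.foldl (fun (acc : List Int × List Int) size =>
      let s0 := PySem.List.pyGetD size 0 0
      let s1 := PySem.List.pyGetD size 1 0
      if s0 ≥ s1 then (acc.1 ++ [s0], acc.2 ++ [s1])
      else (acc.1 ++ [s1], acc.2 ++ [s0])) (w, h)
    = (w ++ sizes.map fmax, h ++ sizes.map fmin) := by
  induction sizes generalizing w h with
  | nil => simp
  | cons s rest ih =>
    simp only [List.foldl_cons, List.map_cons]
    by_cases hc : PySem.List.pyGetD s 0 0 ≥ PySem.List.pyGetD s 1 0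
    · rw [if_pos hc, ih]
      simp [fmax, fmin, max_eq_left hc, min_eq_right hc]
    · rw [if_neg hc, ih]
      push Not at hc
      simp [fmax, fmin, max_eq_right (le_of_lt hc), min_eq_left (le_of_lt hc)]

-- the segment of cards covered by [lo, hi)
def seg (sizes : List (List Int)) (lo hi : Nat) : List (List Int) :=
  (sizes.drop lo).take (hi - lo)

theorem seg_split (sizes : List (List Int)) (lo mid hi : Nat)
    (h1 : lo ≤ mid) (h2 : mid ≤ hi) :
    seg sizes lo hi = seg sizes lo mid ++ seg sizes mid hi := by
  unfold seg
  have : hi - lo = (mid - lo) + (hi - mid) := by omega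
  rw [this, List.take_add, List.drop_drop]
  have h3 : mid - lo + lo = mid := by omega
  have h4 : lo + (mid - lo) = mid := by omega
  simp only [h4]

theorem seg_ne_nil (sizes : List (List Int)) (lo hi : Nat)
    (h1 : lo < hi) (h2 : hi ≤ sizes.length) : seg sizes lo hi ≠ [] := by
  unfold seg
  intro hnil
  have := congrArg List.length hnil
  simp [List.length_take, List.length_drop] at this
  omega

-- characterisation of the divide-and-conquer recursion
theorem solDims_eq (sizes : List (List Int)) :
    ∀ n lo hi, hi - lo = n → lo < hi → hi ≤ sizes.length →
    solDims sizes lo hi = (listMax ((seg sizes lo hi).map fmax),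
                           listMax ((seg sizes lo hi).map fmin)) := by
  intro n
  induction n using Nat.strong_induction_on with
  | _ n ih =>
    intro lo hi hn hlt hle
    rw [solDims]
    by_cases hb : hi ≤ lo + 1
    · have hhi : hi = lo + 1 := by omega
      have hlo : lo < sizes.length := by omega
      have hg : sizes[lo]?.getD ([] : List Int) = sizes[lo] := by
        rw [List.getElem?_eq_getElem hlo]
        rfl
      have hseg : seg sizes lo hi = [sizes[lo]] := by
        unfold seg
        have h1 : hi - lo = 1 := by omega
        rw [h1, List.drop_eq_getElem_cons hlo]
        rfl
      rw [dif_pos hb, hseg]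
      simp only [List.getD, hg, List.map_cons, List.map_nil, listMax, List.foldl_nil,
                 fmax, fmin]
      split_ifs with h <;> rw [Prod.ext_iff] <;> constructor <;> simp <;> omega
    · rw [dif_neg hb]
      dsimp only
      have hmid1 : lo < (lo + hi) / 2 := by omega
      have hmid2 : (lo + hi) / 2 < hi := by omega
      rw [ih ((lo + hi) / 2 - lo) (by omega) lo ((lo + hi) / 2) rfl hmid1 (by omega),
          ih (hi - (lo + hi) / 2) (by omega) ((lo + hi) / 2) hi rfl hmid2 hle]
      have hs := seg_split sizes lo ((lo + hi) / 2) hi (by omega) (by omega)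
      have hn1 := seg_ne_nil sizes lo ((lo + hi) / 2) hmid1 (by omega)
      have hn2 := seg_ne_nil sizes ((lo + hi) / 2) hi hmid2 hle
      rw [hs, List.map_append, List.map_append,
          listMax_append _ _ (by simpa using hn1) (by simpa using hn2),
          listMax_append _ _ (by simpa using hn1) (by simpa using hn2)]

-- ===== VERDICT (by name: the statement is the Claim_ definition above) =====
theorem solution_spec : Claim_equal_solution := by
  intro sizes _ hpre
  obtain ⟨hne, -⟩ := hpre
  unfold Spec_solution solution solution_alt
  rw [solution_loop_eq]
  rw [solDims_eq sizes sizes.length 0 sizes.length rfl (by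
        cases sizes with
        | nil => exact absurd rfl hne
        | cons x t => simp) le_rfl]
  have hseg : seg sizes 0 sizes.length = sizes := by
    unfold seg; simp
  rw [hseg]
  cases sizes with
  | nil => exact absurd rfl hne
  | cons x t =>
    simp [PySem.List.max?_id_cons, listMax]
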